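-- pv_equiv track=rewrite | github.com/alpsla/evolution-engine | evolution/report_generator.py | _match_patterns_to_changes
-- ===== SOURCE A (Python) =====
-- def _match_patterns_to_changes(changes, all_patterns):
--     """Match patterns to changes by family+metric overlap.
--
--     A pattern is relevant to a change if the pattern's families contain the
--     change's family AND the pattern's metrics contain the change's metric.
--
--     Returns:
--         matched: dict mapping change index -> list of matched patterns
--         unmatched: list of patterns that didn't match any change
--     """
--     matched = {}
--     matched_ids = set()
--     for i, change in enumerate(changes):
--         c_family = change.get("family", "")
--         c_metric = change.get("metric", "")
--         for p in all_patterns: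
--             p_families = set(p.get("families") or p.get("sources") or [])
--             p_metrics = set(p.get("metrics") or [])
--             if c_family in p_families and c_metric in p_metrics:
--                 matched.setdefault(i, []).append(p)
--                 matched_ids.add(id(p))
--     unmatched = [p for p in all_patterns if id(p) not in matched_ids]
--     return matched, unmatched
-- ===== SOURCE B (Python) =====
-- def _match_patterns_to_changes(changes, all_patterns):
--     """Index patterns by (family, metric) pairs once; O(1) lookup per change."""
--     index = {}
--     for j, p in enumerate(all_patterns):
--         families = p.get("families") or p.get("sources") or []
--         metrics = p.get("metrics") or []
--         for f in set(families):
--             for m in set(metrics):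
--                 index.setdefault((f, m), []).append(j)
--     matched = {}
--     used = set()
--     for i, change in enumerate(changes):
--         js = index.get((change.get("family", ""), change.get("metric", "")), [])
--         if js:
--             matched[i] = [all_patterns[j] for j in js]
--             used.update(js)
--     unmatched = [p for j, p in enumerate(all_patterns) if j not in used]
--     return matched, unmatched
-- ===== Notes on version B (the rewrite author's own statement) =====
-- stated objective: alternative
-- what changed: B builds a (family, metric) -> pattern-indices dictionary in one pass over the patterns and then answers each change with a single dictionary lookup, tracking matched patterns by index, instead of A's rescan of every pattern for every change.
import Mathlib
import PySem

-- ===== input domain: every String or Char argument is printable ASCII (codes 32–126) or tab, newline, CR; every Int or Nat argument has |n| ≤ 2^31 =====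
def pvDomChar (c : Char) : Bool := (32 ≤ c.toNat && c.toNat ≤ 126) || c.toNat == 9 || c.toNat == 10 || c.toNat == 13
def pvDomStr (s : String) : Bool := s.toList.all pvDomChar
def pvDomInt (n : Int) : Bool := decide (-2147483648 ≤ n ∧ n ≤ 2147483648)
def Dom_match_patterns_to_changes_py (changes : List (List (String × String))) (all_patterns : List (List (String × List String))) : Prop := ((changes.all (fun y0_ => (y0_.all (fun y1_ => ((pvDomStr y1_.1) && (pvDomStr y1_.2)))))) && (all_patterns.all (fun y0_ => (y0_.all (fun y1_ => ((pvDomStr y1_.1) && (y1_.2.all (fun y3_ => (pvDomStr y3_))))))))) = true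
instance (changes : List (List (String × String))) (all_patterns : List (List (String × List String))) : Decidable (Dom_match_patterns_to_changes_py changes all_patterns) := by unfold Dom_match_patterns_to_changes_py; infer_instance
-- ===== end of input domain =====

-- B replaces A's per-change scan of all patterns by a (family, metric) → pattern-indices
-- dictionary built once, one lookup per change (objective: alternative); same return value.

-- ===== PORT A =====
-- change.get(k, dflt) on the association list (first match)
def pvGetS (c : List (String × String)) (k dflt : String) : String :=
  match c.find? (fun kv => kv.1 == k) with
  | some kv => kv.2
  | none => dflt

-- p.get(k) for a list-valued key; missing key → [] (falsy, same as Python's None here)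
def pvGetL (p : List (String × List String)) (k : String) : List String :=
  match p.find? (fun kv => kv.1 == k) with
  | some kv => kv.2
  | none => []

-- p.get("families") or p.get("sources") or []   (truthiness: [] and missing are both falsy)
def pvFamilies (p : List (String × List String)) : List String :=
  let a := pvGetL p "families"
  if a ≠ [] then a else pvGetL p "sources"

-- p.get("metrics") or []
def pvMetrics (p : List (String × List String)) : List String :=
  pvGetL p "metrics"

def match_patterns_to_changes_py (changes : List (List (String × String))) (all_patterns : List (List (String × List String))) : (List (Int × List (List (String × List String)))) × (List (List (String × List String))) :=
  let st :=
    (PySem.List.enumerate changes).foldl (fun st ic =>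
      let c_family := pvGetS ic.2 "family" ""
      let c_metric := pvGetS ic.2 "metric" ""
      all_patterns.foldl (fun st p =>
        let p_families := PySem.Set.ofList (pvFamilies p)
        let p_metrics := PySem.Set.ofList (pvMetrics p)
        if p_families.contains c_family && p_metrics.contains c_metric then
          -- matched.setdefault(i, []).append(p)  ≡  matched[i] = matched.get(i, []) + [p]
          (st.1.modify ic.1 [] (· ++ [p]), PySem.Set.add st.2 p)
        else st) st)
      ((PySem.Dict.empty : PySem.Dict Int (List (List (String × List String)))),
       (PySem.Set.empty : PySem.Set (List (String × List String))))
  -- Python tracks matched patterns by id(p); matching is decided by the pattern's value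
  -- alone, so equal-valued objects match together and the value set filters identically.
  (st.1.items, all_patterns.filter (fun p => !(PySem.Set.contains st.2 p)))

-- ===== PORT B =====
def match_patterns_to_changes_py_alt (changes : List (List (String × String))) (all_patterns : List (List (String × List String))) : (List (Int × List (List (String × List String)))) × (List (List (String × List String))) :=
  let index :=
    (PySem.List.enumerate all_patterns).foldl (fun d jp =>
      (PySem.Set.ofList (pvFamilies jp.2)).foldl (fun d f =>
        (PySem.Set.ofList (pvMetrics jp.2)).foldl (fun d m =>
          -- index.setdefault((f, m), []).append(j); per-key lists stay sorted by j, so the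
          -- result is independent of the set-iteration order (families/metrics are dedup'd)
          PySem.Dict.modify d (f, m) [] (· ++ [jp.1])) d) d)
      (PySem.Dict.empty : PySem.Dict (String × String) (List Int))
  let st :=
    (PySem.List.enumerate changes).foldl (fun st ic =>
      let js := index.getD (pvGetS ic.2 "family" "", pvGetS ic.2 "metric" "") []
      if js ≠ [] then
        (st.1.insert ic.1 (js.map (fun j => PySem.List.pyGetD all_patterns j [])),
         PySem.Set.update st.2 js)
      else st)
      ((PySem.Dict.empty : PySem.Dict Int (List (List (String × List String)))),
       (PySem.Set.empty : PySem.Set Int))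
  (st.1.items,
   ((PySem.List.enumerate all_patterns).filter (fun jp => !(PySem.Set.contains st.2 jp.1))).map (·.2))

-- ===== PRECONDITION & SPEC =====
def Spec_match_patterns_to_changes_py (changes : List (List (String × String))) (all_patterns : List (List (String × List String))) (out : (List (Int × List (List (String × List String)))) × (List (List (String × List String)))) : Prop := out = match_patterns_to_changes_py_alt changes all_patterns
instance (changes : List (List (String × String))) (all_patterns : List (List (String × List String))) (out : (List (Int × List (List (String × List String)))) × (List (List (String × List String)))) : Decidable (Spec_match_patterns_to_changes_py changes all_patterns out) := by
  unfold Spec_match_patterns_to_changes_py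
  have h1 : DecidableEq (List (List (String × List String))) := inferInstance
  have h2 : DecidableEq (Int × List (List (String × List String))) := @instDecidableEqProd _ _ _ h1
  have h3 : DecidableEq (List (Int × List (List (String × List String)))) := @instDecidableEqList _ h2
  have h4 : DecidableEq ((List (Int × List (List (String × List String)))) × (List (List (String × List String)))) := @instDecidableEqProd _ _ h3 h1
  exact h4 out (match_patterns_to_changes_py_alt changes all_patterns)

-- ===== CLAIM (what is proved, stated in full; the proofs are below) =====
def Claim_equal_match_patterns_to_changes_py : Prop := ∀ (changes : List (List (String × String))) (all_patterns : List (List (String × List String))), Dom_match_patterns_to_changes_py changes all_patterns → Spec_match_patterns_to_changes_py changes all_patterns (match_patterns_to_changes_py changes all_patterns)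


-- ===== LEMMAS AND PROOFS =====

abbrev Pat := List (String × List String)
abbrev Chg := List (String × String)

-- the (value-level) match predicate both programs decide
def pmatch (f m : String) (p : Pat) : Bool :=
  (pvFamilies p).contains f && (pvMetrics p).contains m

-- the patterns matching change c, in pattern order (A's inner append order)
def mlist (aps : List Pat) (c : Chg) : List Pat :=
  aps.filter (pmatch (pvGetS c "family" "") (pvGetS c "metric" ""))

-- B's index and lookup, named for the proofs
def pvIndex (aps : List Pat) : PySem.Dict (String × String) (List Int) :=
  (PySem.List.enumerate aps).foldl (fun d jp =>
    (PySem.Set.ofList (pvFamilies jp.2)).foldl (fun d f =>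
      (PySem.Set.ofList (pvMetrics jp.2)).foldl (fun d m =>
        PySem.Dict.modify d (f, m) [] (· ++ [jp.1])) d) d)
    PySem.Dict.empty

def pvJs (aps : List Pat) (c : Chg) : List Int :=
  (pvIndex aps).getD (pvGetS c "family" "", pvGetS c "metric" "") []

lemma condA_eq (f m : String) (p : Pat) :
    ((PySem.Set.ofList (pvFamilies p)).contains f && (PySem.Set.ofList (pvMetrics p)).contains m)
      = pmatch f m p := by
  by_cases hf : f ∈ pvFamilies p <;> by_cases hm : m ∈ pvMetrics p <;>
    simp [pmatch, PySem.Set.contains, PySem.Set.mem_ofList, hf, hm]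

-- A's inner loop over all patterns, as a pair of independent folds over the matching patterns
lemma innerA (aps : List Pat) (f m : String) (i : Int)
    (d : PySem.Dict Int (List Pat)) (s : PySem.Set Pat) :
    aps.foldl (fun st p =>
        if (PySem.Set.ofList (pvFamilies p)).contains f && (PySem.Set.ofList (pvMetrics p)).contains m then
          (st.1.modify i [] (· ++ [p]), PySem.Set.add st.2 p)
        else st) (d, s)
      = ((aps.filter (pmatch f m)).foldl (fun d p => d.modify i [] (· ++ [p])) d,
         PySem.Set.update s (aps.filter (pmatch f m))) := by
  induction aps generalizing d s with
  | nil => simp [PySem.Set.update]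
  | cons p t ih =>
    rw [List.foldl_cons, List.filter_cons]
    by_cases h : pmatch f m p = true
    · rw [if_pos (by rw [condA_eq]; exact h), if_pos h, List.foldl_cons]
      exact ih _ _
    · rw [if_neg (by rw [condA_eq]; exact h), if_neg h]
      exact ih _ _

-- repeated append-modify at one key is a single insert (nonempty case)
lemma foldl_modify_ne_nil (L : List Pat) (k : Int) (d : PySem.Dict Int (List Pat)) (h : L ≠ []) :
    L.foldl (fun d p => d.modify k [] (· ++ [p])) d = d.insert k (d.getD k [] ++ L) := by
  induction L generalizing d with
  | nil => exact absurd rfl h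
  | cons p t ih =>
    rw [List.foldl_cons]
    by_cases ht : t = []
    · subst ht; simp [PySem.Dict.modify]
    · rw [ih _ ht]
      simp [PySem.Dict.modify, PySem.Dict.getD_insert_self, PySem.Dict.insert_insert_self]

-- enumerate basics
lemma enum_fst_le {α : Type} (xs : List α) (n j : Int) (p : α)
    (h : (j, p) ∈ PySem.List.enumerate xs n) : n ≤ j := by
  induction xs generalizing n with
  | nil => simp [PySem.List.enumerate] at h
  | cons x t ih =>
    rw [PySem.List.enumerate_cons] at h
    rcases List.mem_cons.mp h with h1 | h1
    · simp at h1; omega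
    · have := ih (n + 1) h1; omega

lemma enum_inj {α : Type} (xs : List α) (n j : Int) (p q : α)
    (hp : (j, p) ∈ PySem.List.enumerate xs n) (hq : (j, q) ∈ PySem.List.enumerate xs n) : p = q := by
  induction xs generalizing n with
  | nil => simp [PySem.List.enumerate] at hp
  | cons x t ih =>
    rw [PySem.List.enumerate_cons] at hp hq
    rcases List.mem_cons.mp hp with h1 | h1 <;> rcases List.mem_cons.mp hq with h2 | h2
    · rw [Prod.mk.injEq] at h1 h2; rw [h1.2, h2.2]
    · exfalso; have := enum_fst_le t (n+1) j q h2; simp at h1; omega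
    · exfalso; have := enum_fst_le t (n+1) j p h1; simp at h2; omega
    · exact ih (n+1) h1 h2

lemma enum_snd_mem {α : Type} (xs : List α) (n j : Int) (p : α)
    (h : (j, p) ∈ PySem.List.enumerate xs n) : p ∈ xs := by
  induction xs generalizing n with
  | nil => simp [PySem.List.enumerate] at h
  | cons x t ih =>
    rw [PySem.List.enumerate_cons] at h
    rcases List.mem_cons.mp h with h1 | h1
    · simp at h1; simp [h1]
    · exact List.mem_cons_of_mem _ (ih (n+1) h1)

-- reading back the indexed elements of a filtered enumeration gives the filtered list
lemma enum_filter_map_get (q : Pat → Bool) :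
    ∀ (xs ys : List Pat),
      ((PySem.List.enumerate xs (ys.length : Int)).filter (fun jp => q jp.2)).map
        (fun jp => PySem.List.pyGetD (ys ++ xs) jp.1 []) = xs.filter q := by
  intro xs
  induction xs with
  | nil => intro ys; simp [PySem.List.enumerate]
  | cons x t ih =>
    intro ys
    rw [PySem.List.enumerate_cons, List.filter_cons]
    have hx : PySem.List.pyGetD (ys ++ x :: t) (ys.length : Int) [] = x := by
      rw [PySem.List.pyGetD_natCast]
      rw [List.getD_eq_getElem?_getD, List.getElem?_append_right (Nat.le_refl ys.length)]
      simp
    have ht : ((PySem.List.enumerate t ((ys.length : Int) + 1)).filter (fun jp => q jp.2)).map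
        (fun jp => PySem.List.pyGetD (ys ++ x :: t) jp.1 []) = t.filter q := by
      have := ih (ys ++ [x])
      simp only [List.length_append, List.length_cons, List.length_nil, Nat.cast_add,
        Nat.cast_one, List.append_assoc, List.cons_append, List.nil_append] at this ⊢
      exact this
    by_cases h : q x = true
    · simp only [h, if_pos, List.map_cons, List.filter_cons_of_pos h]
      rw [hx, ht]
    · rw [if_neg (by simp [h]), List.filter_cons_of_neg (by simp [h]), ht]

-- effect of the metric-level fold on one key
lemma inner_ms (ms : List String) (hms : ms.Nodup) :
    ∀ (d : PySem.Dict (String × String) (List Int)) (f : String) (j : Int) (k : String × String),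
      (ms.foldl (fun d m => PySem.Dict.modify d (f, m) [] (· ++ [j])) d).getD k []
        = d.getD k [] ++ (if k.1 = f ∧ k.2 ∈ ms then [j] else []) := by
  induction ms with
  | nil => simp
  | cons m t ih =>
    intro d f j k
    have hnd := List.nodup_cons.mp hms
    rw [List.foldl_cons, ih hnd.2]
    rw [PySem.Dict.getD_modify]
    by_cases hk : k = (f, m)
    · subst hk
      rw [if_pos rfl, if_neg (by simp [hnd.1]), if_pos (by simp)]
      simp
    · rw [if_neg hk]
      by_cases hc : k.1 = f ∧ k.2 ∈ m :: t
      · have hkt : k.1 = f ∧ k.2 ∈ t := by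
          rcases hc with ⟨h1, h2⟩
          rcases List.mem_cons.mp h2 with h3 | h3
          · exact absurd (by rw [← h1, ← h3]) hk
          · exact ⟨h1, h3⟩
        rw [if_pos hc, if_pos hkt]
      · rw [if_neg hc, if_neg (by intro ⟨h1, h2⟩; exact hc ⟨h1, List.mem_cons_of_mem _ h2⟩)]

-- effect of the family×metric double fold on one key
lemma inner_fs (fs : List String) (hfs : fs.Nodup) (ms : List String) (hms : ms.Nodup) :
    ∀ (d : PySem.Dict (String × String) (List Int)) (j : Int) (k : String × String),
      (fs.foldl (fun d f => ms.foldl (fun d m => PySem.Dict.modify d (f, m) [] (· ++ [j])) d) d).getD k []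
        = d.getD k [] ++ (if k.1 ∈ fs ∧ k.2 ∈ ms then [j] else []) := by
  induction fs with
  | nil => simp
  | cons f t ih =>
    intro d j k
    have hnd := List.nodup_cons.mp hfs
    rw [List.foldl_cons, ih hnd.2, inner_ms ms hms]
    by_cases h2 : k.2 ∈ ms
    · by_cases h1 : k.1 = f
      · simp [h1, h2, hnd.1]
      · by_cases h3 : k.1 ∈ t <;> simp [h1, h2, h3]
    · simp [h2]

-- generalized index lemma over any starting dict
lemma index_fold_getD (L : List (Int × Pat)) :
    ∀ (d : PySem.Dict (String × String) (List Int)) (k : String × String),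
      (L.foldl (fun d jp =>
        (PySem.Set.ofList (pvFamilies jp.2)).foldl (fun d f =>
          (PySem.Set.ofList (pvMetrics jp.2)).foldl (fun d m =>
            PySem.Dict.modify d (f, m) [] (· ++ [jp.1])) d) d) d).getD k []
        = d.getD k [] ++ (L.filter (fun jp => pmatch k.1 k.2 jp.2)).map (·.1) := by
  induction L with
  | nil => simp
  | cons jp t ih =>
    intro d k
    rw [List.foldl_cons, List.filter_cons, ih,
      inner_fs _ (PySem.Set.nodup_ofList _) _ (PySem.Set.nodup_ofList _)]
    have hiff : (k.1 ∈ PySem.Set.ofList (pvFamilies jp.2) ∧ k.2 ∈ PySem.Set.ofList (pvMetrics jp.2))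
        ↔ pmatch k.1 k.2 jp.2 = true := by
      simp [PySem.Set.mem_ofList, pmatch]
    by_cases h : pmatch k.1 k.2 jp.2 = true
    · rw [if_pos (hiff.mpr h), if_pos h, List.map_cons, List.append_assoc]; rfl
    · rw [if_neg (fun hc => h (hiff.mp hc)), if_neg h, List.append_nil]

-- what the index holds at each key: the matching pattern indices, in order
lemma index_getD (aps : List Pat) (k : String × String) :
    (pvIndex aps).getD k []
      = ((PySem.List.enumerate aps).filter (fun jp => pmatch k.1 k.2 jp.2)).map (·.1) := by
  unfold pvIndex
  rw [index_fold_getD]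
  simp [PySem.Dict.getD_empty]

-- B's looked-up indices read back to exactly A's matched-pattern list
lemma js_map_get (aps : List Pat) (c : Chg) :
    (pvJs aps c).map (fun j => PySem.List.pyGetD aps j []) = mlist aps c := by
  unfold pvJs mlist
  rw [index_getD, List.map_map]
  have h := enum_filter_map_get (pmatch (pvGetS c "family" "") (pvGetS c "metric" "")) aps []
  simpa using h

lemma js_ne_iff (aps : List Pat) (c : Chg) : (pvJs aps c ≠ []) ↔ (mlist aps c ≠ []) := by
  rw [← js_map_get aps c]
  simp

-- membership through a fold of set-updates
lemma foldl_update_mem {α β : Type} [BEq α] [LawfulBEq α] (g : β → List α) :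
    ∀ (L : List β) (s : PySem.Set α) (x : α),
      x ∈ L.foldl (fun s b => PySem.Set.update s (g b)) s ↔ x ∈ s ∨ ∃ b ∈ L, x ∈ g b := by
  intro L
  induction L with
  | nil => simp
  | cons b t ih =>
    intro s x
    rw [List.foldl_cons, ih]
    simp only [PySem.Set.mem_update, List.mem_cons]
    constructor
    · rintro ((h | h) | ⟨b', hb', hx⟩)
      · exact Or.inl h
      · exact Or.inr ⟨b, Or.inl rfl, h⟩
      · exact Or.inr ⟨b', Or.inr hb', hx⟩
    · rintro (h | ⟨b', (rfl | hb'), hx⟩)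
      · exact Or.inl (Or.inl h)
      · exact Or.inl (Or.inr hx)
      · exact Or.inr ⟨b', hb', hx⟩

lemma foldl_update_if_mem {α β : Type} [BEq α] [LawfulBEq α] (g : β → List α) :
    ∀ (L : List β) (s : PySem.Set α) (x : α),
      x ∈ L.foldl (fun s b => if g b ≠ [] then PySem.Set.update s (g b) else s) s
        ↔ x ∈ s ∨ ∃ b ∈ L, x ∈ g b := by
  intro L
  induction L with
  | nil => simp
  | cons b t ih =>
    intro s x
    rw [List.foldl_cons]
    by_cases h : g b = []
    · rw [if_neg (by simp [h]), ih]
      simp only [List.mem_cons]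
      constructor
      · rintro (hx | ⟨b', hb', hx⟩)
        · exact Or.inl hx
        · exact Or.inr ⟨b', Or.inr hb', hx⟩
      · rintro (hx | ⟨b', (rfl | hb'), hx⟩)
        · exact Or.inl hx
        · rw [h] at hx; simp at hx
        · exact Or.inr ⟨b', hb', hx⟩
    · rw [if_pos h, ih]
      simp only [PySem.Set.mem_update, List.mem_cons]
      constructor
      · rintro ((hx | hx) | ⟨b', hb', hx⟩)
        · exact Or.inl hx
        · exact Or.inr ⟨b, Or.inl rfl, hx⟩
        · exact Or.inr ⟨b', Or.inr hb', hx⟩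
      · rintro (hx | ⟨b', (rfl | hb'), hx⟩)
        · exact Or.inl (Or.inl hx)
        · exact Or.inl (Or.inr hx)
        · exact Or.inr ⟨b', hb', hx⟩

-- the two matched dicts are equal (keys are fresh: indices grow along the change loop)
lemma dict_eq (aps : List Pat) :
    ∀ (cl : List Chg) (n : Nat) (d : PySem.Dict Int (List Pat)),
      (∀ m : Nat, n ≤ m → d.contains (m : Int) = false) →
      (PySem.List.enumerate cl (n : Int)).foldl
          (fun d ic => (mlist aps ic.2).foldl (fun d p => d.modify ic.1 [] (· ++ [p])) d) d
        = (PySem.List.enumerate cl (n : Int)).foldl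
          (fun d ic => if pvJs aps ic.2 ≠ [] then
              d.insert ic.1 ((pvJs aps ic.2).map (fun j => PySem.List.pyGetD aps j [])) else d) d := by
  intro cl
  induction cl with
  | nil => intro n d _; simp [PySem.List.enumerate]
  | cons c t ih =>
    intro n d hfresh
    rw [PySem.List.enumerate_cons, List.foldl_cons, List.foldl_cons]
    have hc : ((n : Int) + 1) = (((n + 1 : Nat)) : Int) := by push_cast; ring
    by_cases h : mlist aps c = []
    · rw [h, List.foldl_nil, if_neg (by simpa using (js_ne_iff aps c).not_right.mpr (by simp [h]))]
      rw [hc]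
      exact ih (n + 1) d (fun m hm => hfresh m (by omega))
    · rw [foldl_modify_ne_nil _ _ _ h,
        PySem.Dict.getD_of_not_contains d [] (hfresh n (Nat.le_refl n)), List.nil_append,
        if_pos ((js_ne_iff aps c).mpr h), js_map_get, hc]
      exact ih (n + 1) (d.insert (n : Int) (mlist aps c)) (fun m hm => by
        rw [PySem.Dict.contains_insert]
        have h1 : ((m : Int) == (n : Int)) = false := by
          simp only [beq_eq_false_iff_ne]; intro he; omega
        rw [h1, hfresh m (by omega), Bool.or_false])

-- a filtered enumeration projected to elements, when the index test agrees with an element test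
lemma filter_enum_map {α : Type} (r : Int → Bool) (rq : α → Bool) :
    ∀ (xs : List α) (n : Int),
      (∀ j p, (j, p) ∈ PySem.List.enumerate xs n → r j = rq p) →
      ((PySem.List.enumerate xs n).filter (fun jp => r jp.1)).map (·.2) = xs.filter rq := by
  intro xs
  induction xs with
  | nil => intro n _; simp [PySem.List.enumerate]
  | cons x t ih =>
    intro n h
    rw [PySem.List.enumerate_cons, List.filter_cons, List.filter_cons]
    have hx : r n = rq x := h n x (by rw [PySem.List.enumerate_cons]; exact List.mem_cons_self)
    have ht := ih (n + 1) (fun j p hm => h j p (by rw [PySem.List.enumerate_cons]; exact List.mem_cons_of_mem _ hm))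
    by_cases hq : rq x = true
    · rw [if_pos (by rw [hx]; exact hq), if_pos hq, List.map_cons, ht]
    · rw [if_neg (by rw [hx]; exact hq), if_neg hq, ht]

-- port A, written with the named pieces
lemma portA_eq (changes : List Chg) (aps : List Pat) :
    match_patterns_to_changes_py changes aps =
      (((PySem.List.enumerate changes).foldl
          (fun d ic => (mlist aps ic.2).foldl (fun d p => d.modify ic.1 [] (· ++ [p])) d)
          PySem.Dict.empty).items,
       aps.filter (fun p => !(PySem.Set.contains
          ((PySem.List.enumerate changes).foldl (fun s ic => PySem.Set.update s (mlist aps ic.2))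
            PySem.Set.empty) p))) := by
  unfold match_patterns_to_changes_py
  dsimp only
  have hstep : ∀ (st : PySem.Dict Int (List Pat) × PySem.Set Pat) (ic : Int × Chg),
      ic ∈ PySem.List.enumerate changes →
      (aps.foldl (fun st p =>
        if (PySem.Set.ofList (pvFamilies p)).contains (pvGetS ic.2 "family" "") &&
           (PySem.Set.ofList (pvMetrics p)).contains (pvGetS ic.2 "metric" "") then
          (st.1.modify ic.1 [] (· ++ [p]), PySem.Set.add st.2 p)
        else st) st)
      = ((mlist aps ic.2).foldl (fun d p => d.modify ic.1 [] (· ++ [p])) st.1,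
         PySem.Set.update st.2 (mlist aps ic.2)) := by
    intro st ic _
    exact innerA aps _ _ ic.1 st.1 st.2
  have h1 : List.foldl (fun (st : PySem.Dict Int (List Pat) × PySem.Set Pat) (ic : Int × Chg) =>
        List.foldl (fun st p =>
          if ((PySem.Set.ofList (pvFamilies p)).contains (pvGetS ic.2 "family" "") &&
              (PySem.Set.ofList (pvMetrics p)).contains (pvGetS ic.2 "metric" "")) = true then
            (st.1.modify ic.1 [] (· ++ [p]), st.2.add p)
          else st) st aps)
        (PySem.Dict.empty, PySem.Set.empty) (PySem.List.enumerate changes)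
      = List.foldl (fun st ic =>
          (List.foldl (fun d p => d.modify ic.1 [] (· ++ [p])) st.1 (mlist aps ic.2),
           st.2.update (mlist aps ic.2)))
        (PySem.Dict.empty, PySem.Set.empty) (PySem.List.enumerate changes) :=
    PySem.List.foldl_congr_mem _ _ _ _ hstep
  have h2 : List.foldl (fun (st : PySem.Dict Int (List Pat) × PySem.Set Pat) (ic : Int × Chg) =>
        (List.foldl (fun d p => d.modify ic.1 [] (· ++ [p])) st.1 (mlist aps ic.2),
         st.2.update (mlist aps ic.2)))
        (PySem.Dict.empty, PySem.Set.empty) (PySem.List.enumerate changes)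
      = (List.foldl (fun d ic => List.foldl (fun d p => d.modify ic.1 [] (· ++ [p])) d (mlist aps ic.2))
          PySem.Dict.empty (PySem.List.enumerate changes),
         List.foldl (fun s ic => s.update (mlist aps ic.2))
          PySem.Set.empty (PySem.List.enumerate changes)) :=
    PySem.List.foldl_prod_mk
      (fun d ic => List.foldl (fun d p => d.modify ic.1 [] (· ++ [p])) d (mlist aps ic.2))
      (fun s ic => s.update (mlist aps ic.2))
      (PySem.List.enumerate changes) PySem.Dict.empty PySem.Set.empty
  rw [h1, h2]

lemma pvIndex_def (aps : List Pat) :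
    pvIndex aps = (PySem.List.enumerate aps).foldl (fun d jp =>
      (PySem.Set.ofList (pvFamilies jp.2)).foldl (fun d f =>
        (PySem.Set.ofList (pvMetrics jp.2)).foldl (fun d m =>
          PySem.Dict.modify d (f, m) [] (· ++ [jp.1])) d) d)
      PySem.Dict.empty := rfl

lemma pvJs_def (aps : List Pat) (c : Chg) :
    pvJs aps c = (pvIndex aps).getD (pvGetS c "family" "", pvGetS c "metric" "") [] := rfl

-- port B, written with the named pieces
lemma portB_eq (changes : List Chg) (aps : List Pat) :
    match_patterns_to_changes_py_alt changes aps =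
      (((PySem.List.enumerate changes).foldl
          (fun d ic => if pvJs aps ic.2 ≠ [] then
              d.insert ic.1 ((pvJs aps ic.2).map (fun j => PySem.List.pyGetD aps j [])) else d)
          PySem.Dict.empty).items,
       ((PySem.List.enumerate aps).filter (fun jp => !(PySem.Set.contains
          ((PySem.List.enumerate changes).foldl
            (fun s ic => if pvJs aps ic.2 ≠ [] then PySem.Set.update s (pvJs aps ic.2) else s)
            PySem.Set.empty) jp.1))).map (·.2)) := by
  unfold match_patterns_to_changes_py_alt
  dsimp only
  simp only [← pvIndex_def, ← pvJs_def]
  have hstep : ∀ (st : PySem.Dict Int (List Pat) × PySem.Set Int),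
      ∀ ic ∈ PySem.List.enumerate changes,
      (if pvJs aps ic.2 ≠ [] then
        (st.1.insert ic.1 ((pvJs aps ic.2).map (fun j => PySem.List.pyGetD aps j [])),
         PySem.Set.update st.2 (pvJs aps ic.2))
       else st)
      = (if pvJs aps ic.2 ≠ [] then
           st.1.insert ic.1 ((pvJs aps ic.2).map (fun j => PySem.List.pyGetD aps j [])) else st.1,
         if pvJs aps ic.2 ≠ [] then PySem.Set.update st.2 (pvJs aps ic.2) else st.2) := by
    intro st ic _
    split <;> rfl
  have h1 : List.foldl (fun (st : PySem.Dict Int (List Pat) × PySem.Set Int) (ic : Int × Chg) =>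
        if pvJs aps ic.2 ≠ [] then
          (st.1.insert ic.1 ((pvJs aps ic.2).map (fun j => PySem.List.pyGetD aps j [])),
           PySem.Set.update st.2 (pvJs aps ic.2))
        else st)
        (PySem.Dict.empty, PySem.Set.empty) (PySem.List.enumerate changes)
      = List.foldl (fun st ic =>
          (if pvJs aps ic.2 ≠ [] then
             st.1.insert ic.1 ((pvJs aps ic.2).map (fun j => PySem.List.pyGetD aps j [])) else st.1,
           if pvJs aps ic.2 ≠ [] then PySem.Set.update st.2 (pvJs aps ic.2) else st.2))
        (PySem.Dict.empty, PySem.Set.empty) (PySem.List.enumerate changes) :=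
    PySem.List.foldl_congr_mem _ _ _ _ hstep
  have h2 : List.foldl (fun (st : PySem.Dict Int (List Pat) × PySem.Set Int) (ic : Int × Chg) =>
        (if pvJs aps ic.2 ≠ [] then
           st.1.insert ic.1 ((pvJs aps ic.2).map (fun j => PySem.List.pyGetD aps j [])) else st.1,
         if pvJs aps ic.2 ≠ [] then PySem.Set.update st.2 (pvJs aps ic.2) else st.2))
        (PySem.Dict.empty, PySem.Set.empty) (PySem.List.enumerate changes)
      = (List.foldl (fun d ic => if pvJs aps ic.2 ≠ [] then
            d.insert ic.1 ((pvJs aps ic.2).map (fun j => PySem.List.pyGetD aps j [])) else d)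
          PySem.Dict.empty (PySem.List.enumerate changes),
         List.foldl (fun s ic => if pvJs aps ic.2 ≠ [] then PySem.Set.update s (pvJs aps ic.2) else s)
          PySem.Set.empty (PySem.List.enumerate changes)) :=
    PySem.List.foldl_prod_mk
      (fun d ic => if pvJs aps ic.2 ≠ [] then
          d.insert ic.1 ((pvJs aps ic.2).map (fun j => PySem.List.pyGetD aps j [])) else d)
      (fun s ic => if pvJs aps ic.2 ≠ [] then PySem.Set.update s (pvJs aps ic.2) else s)
      (PySem.List.enumerate changes) PySem.Dict.empty PySem.Set.empty
  rw [h1, h2]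

-- an index is looked up by a change iff its pattern matches the change
lemma js_mem (aps : List Pat) (c : Chg) (j : Int) (p : Pat)
    (h : (j, p) ∈ PySem.List.enumerate aps 0) :
    j ∈ pvJs aps c ↔ p ∈ mlist aps c := by
  rw [pvJs_def, index_getD]
  constructor
  · intro hj
    rcases List.mem_map.mp hj with ⟨jp, hjp, hfst⟩
    rcases List.mem_filter.mp hjp with ⟨henum, hq⟩
    have heta : jp = (j, jp.2) := by rw [← hfst]
    rw [heta] at henum
    have h2 := enum_inj aps 0 j jp.2 p henum h
    rw [h2] at hq
    exact List.mem_filter.mpr ⟨enum_snd_mem aps 0 j p h, hq⟩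
  · intro hp
    rcases List.mem_filter.mp hp with ⟨_, hq⟩
    exact List.mem_map.mpr ⟨(j, p), List.mem_filter.mpr ⟨h, hq⟩, rfl⟩

-- ===== VERDICT (by name: the statement is the Claim_ definition above) =====
theorem match_patterns_to_changes_py_spec : Claim_equal_match_patterns_to_changes_py := by
  intro changes aps _
  unfold Spec_match_patterns_to_changes_py
  rw [portA_eq, portB_eq]
  rw [Prod.mk.injEq]
  refine ⟨?_, ?_⟩
  · exact congrArg PySem.Dict.items
      (dict_eq aps changes 0 PySem.Dict.empty (fun m _ => rfl))
  · refine (filter_enum_map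
      (fun j => !(List.foldl (fun s ic => if pvJs aps ic.2 ≠ [] then PySem.Set.update s (pvJs aps ic.2) else s)
          PySem.Set.empty (PySem.List.enumerate changes)).contains j)
      (fun p => !(List.foldl (fun s ic => PySem.Set.update s (mlist aps ic.2))
          PySem.Set.empty (PySem.List.enumerate changes)).contains p)
      aps 0 ?_).symm
    intro j p h
    have hc : (PySem.Set.contains
        ((PySem.List.enumerate changes).foldl
          (fun s ic => if pvJs aps ic.2 ≠ [] then PySem.Set.update s (pvJs aps ic.2) else s)
          PySem.Set.empty) j)
      = (PySem.Set.contains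
        ((PySem.List.enumerate changes).foldl (fun s ic => PySem.Set.update s (mlist aps ic.2))
          PySem.Set.empty) p) := by
      rw [Bool.eq_iff_iff]
      simp only [PySem.Set.contains, List.contains_iff_mem]
      rw [foldl_update_if_mem (fun (ic : Int × Chg) => pvJs aps ic.2), foldl_update_mem (fun (ic : Int × Chg) => mlist aps ic.2)]
      have hemp : ∀ {α : Type} (x : α), x ∈ (PySem.Set.empty : PySem.Set α) ↔ False := by
        intro α x; simp [PySem.Set.empty]
      rw [hemp, hemp]
      simp only [false_or]
      exact exists_congr (fun ic => and_congr_right (fun _ => js_mem aps ic.2 j p h))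
    dsimp only
    rw [hc]
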